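-- pv_equiv track=rewrite | github.com/kai3n/Daily-commit-project | Sanghyun/week7/할인 행사.py | solution
-- ===== SOURCE A (Python) =====
-- from collections import Counter
--
-- def solution(want, number, discount):
--     # 제품을 할인 받을 수 있는 날짜 일수
--     answer = 0
--     dic = {}
--     # 원하는 제품만큼 반복
--     for i in range(len(want)):
--         # 원하는 제품 몇개 필횬자 저장
--         dic[want[i]] = number[i]
--     # # 10개 제품 할인받으므로 diccount에서 -9뺴고 반복
--     for i in range(len(discount)-9):
--         # 원하는 제품 저장한거랑 10개 할인 딕셔너리로 수로 변환한것과 같으면 제품 할인 한번 받을수 있으므로 answer +1로 갱신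
--         if dic == Counter(discount[i:i+10]):
--             answer += 1
--     # 제품 할인 받을 수 있는 날짜 반환
--     return answer
-- ===== SOURCE B (Python) =====
-- def solution(want, number, discount):
--     # Sliding-window re-implementation: build the target table once, keep a running
--     # count of the current 10-day window plus how many products already match, and
--     # update only the outgoing/incoming item when the window slides.
--     target = dict(zip(want, number))
--     if any(v <= 0 for v in target.values()):
--         return 0
--     n = len(discount)
--     if n < 10:
--         return 0
--     win = {}
--     matched = 0
--     extra = 0
--     for x in discount[:10]:
--         if x in target:
--             c = win.get(x, 0) + 1
--             win[x] = c
--             if c == target[x]: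
--                 matched += 1
--             elif c == target[x] + 1:
--                 matched -= 1
--         else:
--             extra += 1
--     answer = 1 if (matched == len(target) and extra == 0) else 0
--     for i in range(1, n - 9):
--         out = discount[i - 1]
--         if out in target:
--             c = win.get(out, 0) - 1
--             win[out] = c
--             if c == target[out]:
--                 matched += 1
--             elif c == target[out] - 1:
--                 matched -= 1
--         else:
--             extra -= 1
--         inc = discount[i + 9]
--         if inc in target:
--             c = win.get(inc, 0) + 1
--             win[inc] = c
--             if c == target[inc]:
--                 matched += 1
--             elif c == target[inc] + 1:
--                 matched -= 1
--         else:
--             extra += 1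
--         if matched == len(target) and extra == 0:
--             answer += 1
--     return answer
-- ===== Notes on version B (the rewrite author's own statement) =====
-- stated objective: faster
-- what changed: A rebuilds a Counter of each 10-day window and compares whole dicts per start index; B builds the target dict once, then slides a single window keeping incremental counts plus a 'matched' tally and an 'extra' count, updating only the outgoing/incoming item per step.
import Mathlib
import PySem

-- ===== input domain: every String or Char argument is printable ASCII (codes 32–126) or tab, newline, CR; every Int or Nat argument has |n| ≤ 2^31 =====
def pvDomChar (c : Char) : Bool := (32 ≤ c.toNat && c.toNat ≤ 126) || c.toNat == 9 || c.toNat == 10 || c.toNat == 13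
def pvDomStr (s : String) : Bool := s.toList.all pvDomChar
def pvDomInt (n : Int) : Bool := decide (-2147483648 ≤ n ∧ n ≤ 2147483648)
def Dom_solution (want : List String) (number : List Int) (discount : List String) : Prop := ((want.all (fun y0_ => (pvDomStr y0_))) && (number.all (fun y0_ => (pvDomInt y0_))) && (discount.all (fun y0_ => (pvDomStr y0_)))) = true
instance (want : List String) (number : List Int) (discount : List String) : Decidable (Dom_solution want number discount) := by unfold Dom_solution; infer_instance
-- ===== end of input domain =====

-- B replaces A's per-window Counter construction and full-dict comparison by a single
-- sliding window with incremental match bookkeeping (alternative decomposition; faster in practice).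


-- ===== PORT A =====
-- Python's '==' on dicts ignores insertion order: compare as mappings (keys as a set, values by lookup)
def pyDictEq (d1 d2 : PySem.Dict String Int) : Bool :=
  d1.keys.all (fun k => d2.get? k == d1.get? k) && d2.keys.all (fun k => d1.get? k == d2.get? k)

def solution (want : List String) (number : List Int) (discount : List String) : Int :=
  let dic := (PySem.List.pyRange 0 (want.length : Int) 1).foldl
      (fun d i => d.insert (PySem.List.pyGetD want i "") (PySem.List.pyGetD number i 0))
      PySem.Dict.empty
  (PySem.List.pyRange 0 ((discount.length : Int) - 9) 1).foldl
      (fun answer i =>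
        if pyDictEq dic (PySem.Dict.counter (PySem.List.slice discount (some i) (some (i + 10)))) then
          answer + 1
        else answer)
      0

-- ===== PORT B =====
-- the 'incoming item' block of Source B (count up, adjust 'matched' against the target)
def bAdd (t : PySem.Dict String Int) (s : PySem.Dict String Int × Int × Int) (x : String) :
    PySem.Dict String Int × Int × Int :=
  if t.contains x then
    let c := s.1.getD x 0 + 1
    (s.1.insert x c,
     (if c == t.getD x 0 then s.2.1 + 1
      else if c == t.getD x 0 + 1 then s.2.1 - 1 else s.2.1),
     s.2.2)
  else (s.1, s.2.1, s.2.2 + 1)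

-- the 'outgoing item' block of Source B (count down, adjust 'matched' against the target)
def bSub (t : PySem.Dict String Int) (s : PySem.Dict String Int × Int × Int) (x : String) :
    PySem.Dict String Int × Int × Int :=
  if t.contains x then
    let c := s.1.getD x 0 - 1
    (s.1.insert x c,
     (if c == t.getD x 0 then s.2.1 + 1
      else if c == t.getD x 0 - 1 then s.2.1 - 1 else s.2.1),
     s.2.2)
  else (s.1, s.2.1, s.2.2 - 1)

-- one iteration of Source B's sliding loop (drop discount[i-1], add discount[i+9], count a match)
def bBody (t : PySem.Dict String Int) (discount : List String)
    (st : PySem.Dict String Int × Int × Int × Int) (i : Int) :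
    PySem.Dict String Int × Int × Int × Int :=
  let s1 := bSub t (st.1, st.2.1, st.2.2.1) (PySem.List.pyGetD discount (i - 1) "")
  let s2 := bAdd t s1 (PySem.List.pyGetD discount (i + 9) "")
  (s2.1, s2.2.1, s2.2.2,
   if s2.2.1 == (t.size : Int) && s2.2.2 == 0 then st.2.2.2 + 1 else st.2.2.2)

def solution_alt (want : List String) (number : List Int) (discount : List String) : Int :=
  let target := (want.zip number).foldl (fun d p => d.insert p.1 p.2) PySem.Dict.empty
  if target.values.any (fun v => v ≤ 0) then 0
  else
    let n := discount.length
    if n < 10 then 0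
    else
      let s0 := (PySem.List.slice discount none (some 10)).foldl (bAdd target)
        (PySem.Dict.empty, 0, 0)
      let answer0 : Int := if s0.2.1 == (target.size : Int) && s0.2.2 == 0 then 1 else 0
      let final := (PySem.List.pyRange 1 ((n : Int) - 9) 1).foldl (bBody target discount)
        (s0.1, s0.2.1, s0.2.2, answer0)
      final.2.2.2

-- ===== PRECONDITION & SPEC =====
-- Pre_ excludes only len(want) > len(number), where A raises IndexError (number[i] out of range).
def Pre_solution (want : List String) (number : List Int) (discount : List String) : Prop :=
  want.length ≤ number.length
instance (want : List String) (number : List Int) (discount : List String) : Decidable (Pre_solution want number discount) := by unfold Pre_solution; infer_instance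
def pvWitness_solution : List String × List Int × List String :=
  (["a"], [2], ["a", "a", "b", "a", "b", "b", "b", "b", "b", "b", "b"])

def Spec_solution (want : List String) (number : List Int) (discount : List String) (out : Int) : Prop := out = solution_alt want number discount
instance (want : List String) (number : List Int) (discount : List String) (out : Int) : Decidable (Spec_solution want number discount out) := by unfold Spec_solution; infer_instance

-- ===== CLAIM (what is proved, stated in full; the proofs are below) =====
def Claim_equal_solution : Prop := ∀ (want : List String) (number : List Int) (discount : List String), Dom_solution want number discount → Pre_solution want number discount → Spec_solution want number discount (solution want number discount)
-- ===== LEMMAS AND PROOFS =====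

-- the 10-day window starting at day j
def winAt (discount : List String) (j : Nat) : List String := (discount.drop j).take 10

-- the invariant of B's sliding state (win, matched, extra) for the current window w
def WInv (t : PySem.Dict String Int) (w : List String) (s : PySem.Dict String Int × Int × Int) : Prop :=
  (∀ x, t.contains x = true → s.1.getD x 0 = (w.count x : Int)) ∧
  s.2.1 = ((t.keys.filter (fun k => s.1.getD k 0 == t.getD k 0)).length : Int) ∧
  s.2.2 = ((w.filter (fun x => ! t.contains x)).length : Int)

lemma dict_get?_of_contains {κ ν : Type} [BEq κ] [LawfulBEq κ] (d : PySem.Dict κ ν) (k : κ)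
    (dflt : ν) (h : d.contains k = true) : d.get? k = some (d.getD k dflt) := by
  cases hg : d.get? k with
  | none =>
    rw [PySem.Dict.get?_eq_none_iff_contains] at hg
    rw [h] at hg; cases hg
  | some v => rw [PySem.Dict.getD_eq_get?_getD, hg]; rfl

lemma size_eq_keys_length {κ ν : Type} (d : PySem.Dict κ ν) : d.size = d.keys.length := by
  simp [PySem.Dict.size, PySem.Dict.keys]

-- how the length of a filter moves when the predicate changes at exactly one element of a Nodup list
lemma filter_length_update {α : Type} {l : List α} {x : α} (hnd : l.Nodup) (hx : x ∈ l)
    (p p' : α → Bool) (hag : ∀ y ∈ l, y ≠ x → p' y = p y) :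
    ((l.filter p').length : Int) =
      ((l.filter p).length : Int) + (if p' x then 1 else 0) - (if p x then 1 else 0) := by
  induction l with
  | nil => cases hx
  | cons a l ih =>
    rcases List.mem_cons.mp hx with rfl | hx'
    · have hxl : x ∉ l := (List.nodup_cons.mp hnd).1
      have hfe : l.filter p' = l.filter p :=
        List.filter_congr (fun y hy => hag y (List.mem_cons_of_mem x hy) (fun h => hxl (h ▸ hy)))
      rw [List.filter_cons, List.filter_cons, hfe]
      rcases Bool.eq_false_or_eq_true (p' x) with h1 | h1 <;>
        rcases Bool.eq_false_or_eq_true (p x) with h2 | h2 <;>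
          simp only [h1, h2, if_true, if_false, List.length_cons] <;> push_cast <;> ring
    · have hax : a ≠ x := fun h => (List.nodup_cons.mp hnd).1 (h ▸ hx')
      have hpa : p' a = p a := hag a (List.mem_cons_self ..) hax
      have hind := ih (List.nodup_cons.mp hnd).2 hx'
        (fun y hy hne => hag y (List.mem_cons_of_mem a hy) hne)
      rw [List.filter_cons, List.filter_cons, hpa]
      rcases Bool.eq_false_or_eq_true (p a) with h2 | h2 <;>
        simp only [h2, if_true, if_false, List.length_cons] <;> push_cast <;>
        rw [hind] <;> ring

lemma winv_add (t : PySem.Dict String Int) (hnd : t.keys.Nodup) (w : List String) (x : String)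
    (s : PySem.Dict String Int × Int × Int) (h : WInv t w s) : WInv t (w ++ [x]) (bAdd t s x) := by
  obtain ⟨h1, h2, h3⟩ := h
  by_cases hc : t.contains x = true
  · have hcx : s.1.getD x 0 = (w.count x : Int) := h1 x hc
    have hxk : x ∈ t.keys := (PySem.Dict.contains_iff_mem_keys t x).mp hc
    refine ⟨?_, ?_, ?_⟩
    · intro y hy
      simp only [bAdd, hc, if_pos]
      rw [PySem.Dict.getD_insert]
      by_cases hyx : y = x
      · subst hyx
        rw [if_pos rfl, hcx]
        simp [List.count_append]
      · rw [if_neg hyx, h1 y hy]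
        simp [List.count_append, List.count_eq_zero, hyx, (Ne.symm hyx : ¬ x = y)]
    · simp only [bAdd, hc, if_pos]
      have hupd := filter_length_update (x := x) hnd hxk
        (fun k => s.1.getD k 0 == t.getD k 0)
        (fun k => (s.1.insert x (s.1.getD x 0 + 1)).getD k 0 == t.getD k 0)
        (by intro y _ hyx; simp [PySem.Dict.getD_insert, hyx])
      rw [hupd]
      beta_reduce
      rw [PySem.Dict.getD_insert, if_pos rfl]
      by_cases e1 : s.1.getD x 0 + 1 = t.getD x 0
      · rw [if_pos (by simpa using e1), if_pos (by simpa using e1),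
          if_neg (by simp only [beq_iff_eq]; omega), h2]
        ring
      · by_cases e2 : s.1.getD x 0 + 1 = t.getD x 0 + 1
        · rw [if_neg (by simpa using e1), if_pos (by simpa using e2),
            if_neg (by simpa using e1), if_pos (by simp only [beq_iff_eq]; omega), h2]
          ring
        · rw [if_neg (by simpa using e1), if_neg (by simpa using e2),
            if_neg (by simpa using e1), if_neg (by simp only [beq_iff_eq]; omega), h2]
          ring
    · simp only [bAdd, hc, if_pos]
      rw [h3, List.filter_append]
      simp [hc]
  · have hc' : t.contains x = false := by simpa using hc
    refine ⟨?_, ?_, ?_⟩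
    · intro y hy
      simp only [bAdd, hc', Bool.false_eq_true, if_neg, not_false_iff]
      have hyx : y ≠ x := fun h => by rw [h] at hy; rw [hy] at hc'; cases hc'
      rw [h1 y hy]
      simp [List.count_append, List.count_eq_zero, hyx, (Ne.symm hyx : ¬ x = y)]
    · simpa only [bAdd, hc', Bool.false_eq_true, if_neg, not_false_iff] using h2
    · simp only [bAdd, hc', Bool.false_eq_true, if_neg, not_false_iff]
      rw [h3, List.filter_append]
      simp [hc']

lemma winv_sub (t : PySem.Dict String Int) (hnd : t.keys.Nodup) (w : List String) (x : String)
    (s : PySem.Dict String Int × Int × Int) (h : WInv t (x :: w) s) : WInv t w (bSub t s x) := by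
  obtain ⟨h1, h2, h3⟩ := h
  by_cases hc : t.contains x = true
  · have hcx : s.1.getD x 0 = ((x :: w).count x : Int) := h1 x hc
    have hxk : x ∈ t.keys := (PySem.Dict.contains_iff_mem_keys t x).mp hc
    refine ⟨?_, ?_, ?_⟩
    · intro y hy
      simp only [bSub, hc, if_pos]
      rw [PySem.Dict.getD_insert]
      by_cases hyx : y = x
      · subst hyx
        rw [if_pos rfl, hcx]
        simp [List.count_cons]
      · rw [if_neg hyx, h1 y hy]
        simp [List.count_cons, hyx, (Ne.symm hyx : ¬ x = y)]
    · simp only [bSub, hc, if_pos]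
      have hupd := filter_length_update (x := x) hnd hxk
        (fun k => s.1.getD k 0 == t.getD k 0)
        (fun k => (s.1.insert x (s.1.getD x 0 - 1)).getD k 0 == t.getD k 0)
        (by intro y _ hyx; simp [PySem.Dict.getD_insert, hyx])
      rw [hupd]
      beta_reduce
      rw [PySem.Dict.getD_insert, if_pos rfl]
      by_cases e1 : s.1.getD x 0 - 1 = t.getD x 0
      · rw [if_pos (by simpa using e1), if_pos (by simpa using e1),
          if_neg (by simp only [beq_iff_eq]; omega), h2]
        ring
      · by_cases e2 : s.1.getD x 0 - 1 = t.getD x 0 - 1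
        · rw [if_neg (by simpa using e1), if_pos (by simpa using e2),
            if_neg (by simpa using e1), if_pos (by simp only [beq_iff_eq]; omega), h2]
          ring
        · rw [if_neg (by simpa using e1), if_neg (by simpa using e2),
            if_neg (by simpa using e1), if_neg (by simp only [beq_iff_eq]; omega), h2]
          ring
    · simp only [bSub, hc, if_pos]
      rw [h3, List.filter_cons]
      simp [hc]
  · have hc' : t.contains x = false := by simpa using hc
    refine ⟨?_, ?_, ?_⟩
    · intro y hy
      simp only [bSub, hc', Bool.false_eq_true, if_neg, not_false_iff]
      have hyx : y ≠ x := fun h => by rw [h] at hy; rw [hy] at hc'; cases hc'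
      rw [h1 y hy]
      simp [List.count_cons, hyx, (Ne.symm hyx : ¬ x = y)]
    · simpa only [bSub, hc', Bool.false_eq_true, if_neg, not_false_iff] using h2
    · simp only [bSub, hc', Bool.false_eq_true, if_neg, not_false_iff]
      rw [h3, List.filter_cons]
      simp [hc']

lemma winv_init (t : PySem.Dict String Int) (hnd : t.keys.Nodup)
    (hpos : ∀ k ∈ t.keys, 0 < t.getD k 0) (w : List String) :
    WInv t w (w.foldl (bAdd t) (PySem.Dict.empty, 0, 0)) := by
  induction w using List.reverseRecOn with
  | nil =>
    refine ⟨?_, ?_, ?_⟩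
    · intro x _
      simp [PySem.Dict.getD_empty]
    · have hf : t.keys.filter (fun k => (0 : Int) == t.getD k 0) = [] := by
        rw [List.filter_eq_nil_iff]
        intro k hk
        have := hpos k hk
        simp only [beq_iff_eq]
        omega
      simp [PySem.Dict.getD_empty, hf]
    · simp
  | append_singleton w x ih =>
    rw [List.foldl_append]
    exact winv_add t hnd w x _ ih

lemma never_match (t : PySem.Dict String Int) (k : String) (hk : k ∈ t.keys)
    (hneg : t.getD k 0 ≤ 0) (w : List String) :
    pyDictEq t (PySem.Dict.counter w) = false := by
  by_contra hne
  have htrue : pyDictEq t (PySem.Dict.counter w) = true := by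
    cases h : pyDictEq t (PySem.Dict.counter w)
    · exact absurd h hne
    · rfl
  unfold pyDictEq at htrue
  rw [Bool.and_eq_true, List.all_eq_true, List.all_eq_true] at htrue
  have hkk := htrue.1 k hk
  rw [beq_iff_eq] at hkk
  have htk : t.get? k = some (t.getD k 0) :=
    dict_get?_of_contains t k 0 ((PySem.Dict.contains_iff_mem_keys t k).mpr hk)
  rw [htk] at hkk
  by_cases hcc : (PySem.Dict.counter w).contains k = true
  · have := dict_get?_of_contains (PySem.Dict.counter w) k 0 hcc
    rw [this] at hkk
    rw [PySem.Dict.getD_counter] at hkk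
    have hkmem : k ∈ w := by
      rw [PySem.Dict.contains_counter] at hcc
      simpa using hcc
    have : 0 < w.count k := List.count_pos_iff.mpr hkmem
    have : (0 : Int) < (w.count k : Int) := by exact_mod_cast this
    rw [Option.some.injEq] at hkk
    omega
  · have hcc' : (PySem.Dict.counter w).contains k = false := by simpa using hcc
    rw [(PySem.Dict.get?_eq_none_iff_contains _ k).mpr hcc'] at hkk
    cases hkk

-- the exact-match test: B's 'matched == len(target) and extra == 0' IS A's dict == Counter(window)
lemma cond_eq (t : PySem.Dict String Int) (hnd : t.keys.Nodup)
    (hpos : ∀ k ∈ t.keys, 0 < t.getD k 0) (w : List String)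
    (s : PySem.Dict String Int × Int × Int) (h : WInv t w s) :
    ((s.2.1 == (t.size : Int)) && (s.2.2 == 0)) = pyDictEq t (PySem.Dict.counter w) := by
  obtain ⟨h1, h2, h3⟩ := h
  rw [Bool.eq_iff_iff]
  rw [Bool.and_eq_true, beq_iff_eq, beq_iff_eq]
  unfold pyDictEq
  rw [Bool.and_eq_true, List.all_eq_true, List.all_eq_true]
  have hsz : (t.size : Int) = (t.keys.length : Int) := by rw [size_eq_keys_length]
  constructor
  · rintro ⟨hm, he⟩
    -- matched = size: every wanted product has exactly its count in the window
    have hall : ∀ k ∈ t.keys, (w.count k : Int) = t.getD k 0 := by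
      rw [hsz, h2] at hm
      have : (t.keys.filter (fun k => s.1.getD k 0 == t.getD k 0)).length = t.keys.length := by
        exact_mod_cast hm
      rw [List.length_filter_eq_length_iff] at this
      intro k hk
      have hk' := this k hk
      rw [beq_iff_eq] at hk'
      rw [← h1 k ((PySem.Dict.contains_iff_mem_keys t k).mpr hk)]
      exact hk'
    -- extra = 0: everything in the window is wanted
    have hsub : ∀ x ∈ w, t.contains x = true := by
      rw [h3] at he
      have : (w.filter (fun x => ! t.contains x)).length = 0 := by exact_mod_cast he
      rw [List.length_eq_zero_iff, List.filter_eq_nil_iff] at this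
      intro x hx
      have := this x hx
      simpa using this
    constructor
    · intro k hk
      have hck : t.contains k = true := (PySem.Dict.contains_iff_mem_keys t k).mpr hk
      have hcount := hall k hk
      have hkw : k ∈ w := by
        have : 0 < (w.count k : Int) := by rw [hcount]; exact hpos k hk
        have : 0 < w.count k := by exact_mod_cast this
        exact List.count_pos_iff.mp this
      have hcck : (PySem.Dict.counter w).contains k = true := by
        rw [PySem.Dict.contains_counter]; simpa using hkw
      rw [dict_get?_of_contains _ k 0 hcck, dict_get?_of_contains t k 0 hck,
        PySem.Dict.getD_counter, hcount]
      simp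
    · intro k hk
      rw [PySem.Dict.keys_counter] at hk
      have hkw : k ∈ w := (PySem.Set.mem_ofList w k).mp hk
      have hck : t.contains k = true := hsub k hkw
      have hkkeys := (PySem.Dict.contains_iff_mem_keys t k).mp hck
      have hcck : (PySem.Dict.counter w).contains k = true := by
        rw [PySem.Dict.contains_counter]; simpa using hkw
      rw [dict_get?_of_contains _ k 0 hcck, dict_get?_of_contains t k 0 hck,
        PySem.Dict.getD_counter, hall k hkkeys]
      simp
  · rintro ⟨hfor, hback⟩
    have hall : ∀ k ∈ t.keys, (w.count k : Int) = t.getD k 0 := by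
      intro k hk
      have hck : t.contains k = true := (PySem.Dict.contains_iff_mem_keys t k).mpr hk
      have := hfor k hk
      rw [beq_iff_eq, dict_get?_of_contains t k 0 hck] at this
      by_cases hcc : (PySem.Dict.counter w).contains k = true
      · rw [dict_get?_of_contains _ k 0 hcc, PySem.Dict.getD_counter] at this
        exact Option.some.inj this
      · have hcc' : (PySem.Dict.counter w).contains k = false := by simpa using hcc
        rw [(PySem.Dict.get?_eq_none_iff_contains _ k).mpr hcc'] at this
        cases this
    have hsub : ∀ x ∈ w, t.contains x = true := by
      intro x hx
      have hxk : x ∈ (PySem.Dict.counter w).keys := by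
        rw [PySem.Dict.keys_counter]
        exact (PySem.Set.mem_ofList w x).mpr hx
      have := hback x hxk
      rw [beq_iff_eq] at this
      by_cases hct : t.contains x = true
      · exact hct
      · have hct' : t.contains x = false := by simpa using hct
        rw [(PySem.Dict.get?_eq_none_iff_contains t x).mpr hct'] at this
        have hccx : (PySem.Dict.counter w).contains x = true := by
          rw [PySem.Dict.contains_counter]; simpa using hx
        rw [dict_get?_of_contains _ x 0 hccx] at this
        cases this
    constructor
    · rw [hsz, h2]
      congr 1
      have : t.keys.filter (fun k => s.1.getD k 0 == t.getD k 0) = t.keys := by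
        rw [List.filter_eq_self]
        intro k hk
        rw [h1 k ((PySem.Dict.contains_iff_mem_keys t k).mpr hk), beq_iff_eq]
        exact hall k hk
      rw [this]
    · rw [h3]
      have : w.filter (fun x => ! t.contains x) = [] := by
        rw [List.filter_eq_nil_iff]
        intro x hx
        simp [hsub x hx]
      simp [this]

-- A's index-loop dict construction is B's dict(zip(want, number))
lemma foldl_range_insert : ∀ (ws : List String) (ns : List Int) (d : PySem.Dict String Int),
    ws.length ≤ ns.length →
    (List.range ws.length).foldl (fun d k => d.insert (ws.getD k "") (ns.getD k 0)) d =
      (ws.zip ns).foldl (fun d p => d.insert p.1 p.2) d := by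
  intro ws
  induction ws with
  | nil => intro ns d _; simp
  | cons a ws ih =>
    intro ns d h
    cases ns with
    | nil => simp at h
    | cons b ns =>
      simp only [List.length_cons]
      rw [List.range_succ_eq_map, List.foldl_cons, List.foldl_map]
      simp only [List.getD_cons_zero, List.getD_cons_succ, List.zip_cons_cons, List.foldl_cons]
      exact ih ns _ (by simpa using h)

lemma winAt_eq_cons (d : List String) (j : Nat) (h : j + 10 ≤ d.length) :
    winAt d j = d[j]'(by omega) :: (d.drop (j + 1)).take 9 := by
  unfold winAt
  rw [List.drop_eq_getElem_cons (by omega)]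
  rfl

lemma winAt_succ (d : List String) (j : Nat) (h : j + 11 ≤ d.length) :
    winAt d (j + 1) = (d.drop (j + 1)).take 9 ++ [d[j + 10]'(by omega)] := by
  unfold winAt
  conv_lhs => rw [show (10 : Nat) = 9 + 1 from rfl, List.take_succ]
  congr 1
  rw [List.getElem?_drop]
  rw [List.getElem?_eq_getElem (by omega)]
  rfl

-- the sliding loop: after m slides the state tracks window m and the answer counts windows 1..m
lemma loopB_spec (t : PySem.Dict String Int) (disc : List String)
    (hnd : t.keys.Nodup) (hpos : ∀ k ∈ t.keys, 0 < t.getD k 0) :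
    ∀ (m : Nat), m + 10 ≤ disc.length →
    ∀ (s : PySem.Dict String Int × Int × Int) (ans : Int), WInv t (winAt disc 0) s →
      WInv t (winAt disc m)
        ((((List.range m).map (fun k : Nat => (1 : Int) + (k : Int))).foldl (bBody t disc) (s.1, s.2.1, s.2.2, ans)).1,
         (((List.range m).map (fun k : Nat => (1 : Int) + (k : Int))).foldl (bBody t disc) (s.1, s.2.1, s.2.2, ans)).2.1,
         (((List.range m).map (fun k : Nat => (1 : Int) + (k : Int))).foldl (bBody t disc) (s.1, s.2.1, s.2.2, ans)).2.2.1) ∧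
      (((List.range m).map (fun k : Nat => (1 : Int) + (k : Int))).foldl (bBody t disc) (s.1, s.2.1, s.2.2, ans)).2.2.2 =
        ans + (((List.range m).countP (fun j => pyDictEq t (PySem.Dict.counter (winAt disc (j + 1))))) : Int) := by
  intro m
  induction m with
  | zero =>
    intro _ s ans h
    simpa using h
  | succ m ih =>
    intro hm s ans h
    have hm' : m + 10 ≤ disc.length := by omega
    obtain ⟨ihh, iha⟩ := ih hm' s ans h
    rw [List.range_succ, List.map_append, List.foldl_append]
    set st := (((List.range m).map (fun k : Nat => (1 : Int) + (k : Int))).foldl (bBody t disc) (s.1, s.2.1, s.2.2, ans)) with hst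
    simp only [List.map_cons, List.map_nil, List.foldl_cons, List.foldl_nil]
    -- indices in the body (kept as pyGetD so terms match the unfolded bBody syntactically)
    have hget1 : PySem.List.pyGetD disc ((1 : Int) + (m : Int) - 1) "" = disc[m]'(by omega) := by
      rw [show ((1 : Int) + (m : Int) - 1) = ((m : Nat) : Int) from by push_cast; ring,
        PySem.List.pyGetD_natCast, List.getD_eq_getElem _ _ (by omega)]
    have hget2 : PySem.List.pyGetD disc ((1 : Int) + (m : Int) + 9) "" = disc[m + 10]'(by omega) := by
      rw [show ((1 : Int) + (m : Int) + 9) = (((m + 10 : Nat)) : Int) from by push_cast; ring,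
        PySem.List.pyGetD_natCast, List.getD_eq_getElem _ _ (by omega)]
    have hwincons : winAt disc m =
        PySem.List.pyGetD disc ((1 : Int) + (m : Int) - 1) "" :: (disc.drop (m + 1)).take 9 := by
      rw [hget1]
      exact winAt_eq_cons disc m (by omega)
    have hwinsucc : winAt disc (m + 1) =
        (disc.drop (m + 1)).take 9 ++ [PySem.List.pyGetD disc ((1 : Int) + (m : Int) + 9) ""] := by
      rw [hget2]
      exact winAt_succ disc m (by omega)
    have hwin1 : WInv t ((disc.drop (m + 1)).take 9)
        (bSub t (st.1, st.2.1, st.2.2.1) (PySem.List.pyGetD disc ((1 : Int) + (m : Int) - 1) "")) := by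
      apply winv_sub t hnd
      rw [← hwincons]
      exact ihh
    have hwin2 : WInv t (winAt disc (m + 1))
        (bAdd t (bSub t (st.1, st.2.1, st.2.2.1) (PySem.List.pyGetD disc ((1 : Int) + (m : Int) - 1) ""))
          (PySem.List.pyGetD disc ((1 : Int) + (m : Int) + 9) "")) := by
      rw [hwinsucc]
      exact winv_add t hnd _ _ _ hwin1
    constructor
    · simp only [bBody]
      exact ⟨hwin2.1, hwin2.2.1, hwin2.2.2⟩
    · simp only [bBody]
      have hcond := cond_eq t hnd hpos (winAt disc (m + 1)) _ hwin2
      rcases Bool.eq_false_or_eq_true (pyDictEq t (PySem.Dict.counter (winAt disc (m + 1)))) with hp | hp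
      · have hcnd := hcond.trans hp
        rw [if_pos hcnd, iha, List.countP_append]
        simp only [List.countP_cons, List.countP_nil, hp, if_true]
        push_cast
        ring
      · have hcnd := hcond.trans hp
        rw [if_neg (fun hh : _ = true => Bool.false_ne_true (hcnd.symm.trans hh)), iha,
          List.countP_append]
        simp only [List.countP_cons, List.countP_nil, hp, Bool.false_eq_true, if_false]
        push_cast
        ring

-- splitting the count over all windows into window 0 plus windows 1..n
lemma countP_range_succ_shift (n : Nat) (q : Nat → Bool) :
    ((List.range (n + 1)).countP q : Int) =
      (if q 0 then 1 else 0) + ((List.range n).countP (fun j => q (j + 1)) : Int) := by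
  rw [List.range_succ_eq_map]
  rw [List.countP_cons]
  rw [List.countP_map]
  by_cases h0 : q 0 <;> simp [h0, Function.comp_def, Nat.succ_eq_add_one] <;> push_cast <;> ring

theorem solution_spec : Claim_equal_solution := by
  intro want number discount _ hpre
  unfold Spec_solution solution solution_alt Pre_solution at *
  -- A's dict is B's dict(zip(want, number))
  have hdic :
      (PySem.List.pyRange 0 (want.length : Int) 1).foldl
        (fun d i => d.insert (PySem.List.pyGetD want i "") (PySem.List.pyGetD number i 0))
        PySem.Dict.empty =
      (want.zip number).foldl (fun d p => d.insert p.1 p.2) PySem.Dict.empty := by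
    rw [PySem.List.pyRange_one, List.foldl_map]
    have hlen : (((want.length : Int) - 0)).toNat = want.length := by omega
    rw [hlen]
    rw [← foldl_range_insert want number PySem.Dict.empty hpre]
    apply PySem.List.foldl_congr_mem
    intro acc k hk
    rw [List.mem_range] at hk
    have : (0 : Int) + (k : Int) = ((k : Nat) : Int) := by ring
    rw [this, PySem.List.pyGetD_natCast, PySem.List.pyGetD_natCast]
  rw [hdic]
  set t := (want.zip number).foldl (fun d p => d.insert p.1 p.2) PySem.Dict.empty with ht
  have hnd : t.keys.Nodup := by
    rw [ht]
    exact PySem.Dict.nodup_keys_foldl_insert_key (want.zip number) Prod.fst (fun _ p => p.2)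
      PySem.Dict.empty (by simp [PySem.Dict.keys_empty])
  -- A as a count over windows
  have hA : ∀ (N : Nat), discount.length = N →
      (PySem.List.pyRange 0 ((discount.length : Int) - 9) 1).foldl
        (fun answer i =>
          if pyDictEq t (PySem.Dict.counter (PySem.List.slice discount (some i) (some (i + 10)))) then
            answer + 1
          else answer) 0 =
      (((List.range ((N : Int) - 9).toNat).countP
          (fun j => pyDictEq t (PySem.Dict.counter (winAt discount j)))) : Int) := by
    intro N hN
    subst hN
    rw [PySem.List.pyRange_one, List.foldl_map]
    rw [show ((discount.length : Int) - 9 - 0) = ((discount.length : Int) - 9) from by ring]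
    have hcong := PySem.List.foldl_congr_mem
      (l := List.range ((discount.length : Int) - 9).toNat)
      (f := fun (acc : Int) (j : Nat) =>
        if pyDictEq t (PySem.Dict.counter
            (PySem.List.slice discount (some ((0 : Int) + j)) (some ((0 : Int) + j + 10)))) = true then
          acc + 1
        else acc)
      (g := fun (acc : Int) (j : Nat) =>
        if pyDictEq t (PySem.Dict.counter (winAt discount j)) = true then acc + 1 else acc)
      (init := 0)
      (by
        intro acc j _
        have hslice : PySem.List.slice discount (some ((0 : Int) + j)) (some ((0 : Int) + j + 10)) =
            winAt discount j := by
          rw [show ((0 : Int) + (j : Int)) = ((j : Nat) : Int) from by ring,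
            show (((j : Nat) : Int) + 10) = (((j : Nat) : Int) + ((10 : Nat) : Int)) from by push_cast; ring]
          rw [PySem.List.slice_natCast_add]
          rfl
        simp only [hslice])
    rw [hcong, PySem.List.foldl_if_add_one]
    simp
  by_cases hneg : t.values.any (fun v => decide (v ≤ 0)) = true
  · -- some wanted count is ≤ 0: A matches no window, B returns 0 up front
    simp only [hneg, if_true]
    obtain ⟨v, hv, hvle⟩ := List.any_eq_true.mp hneg
    rw [PySem.Dict.values_eq_map_keys t hnd 0] at hv
    obtain ⟨k, hk, hkv⟩ := List.mem_map.mp hv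
    rw [hA discount.length rfl]
    have : ∀ j ∈ List.range ((discount.length : Int) - 9).toNat,
        ¬ (pyDictEq t (PySem.Dict.counter (winAt discount j)) = true) := by
      intro j _
      rw [never_match t k hk (by rw [hkv]; exact of_decide_eq_true hvle)]
      simp
    rw [List.countP_eq_zero.mpr this]
    rfl
  · have hposv : ∀ k ∈ t.keys, 0 < t.getD k 0 := by
      intro k hk
      have hvmem : t.getD k 0 ∈ t.values := by
        rw [PySem.Dict.values_eq_map_keys t hnd 0]
        exact List.mem_map.mpr ⟨k, hk, rfl⟩
      by_contra hle
      exact hneg (List.any_eq_true.mpr ⟨t.getD k 0, hvmem, by simp; omega⟩)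
    simp only [hneg, if_false, Bool.false_eq_true]
    by_cases hsmall : discount.length < 10
    · simp only [hsmall, if_true]
      rw [hA discount.length rfl]
      have : ((discount.length : Int) - 9).toNat = 0 := by omega
      rw [this]
      simp
    · simp only [hsmall, if_false]
      have hlen10 : 10 ≤ discount.length := by omega
      -- initial window
      have hs0w : PySem.List.slice discount none (some 10) = winAt discount 0 := by
        rw [PySem.List.slice_to discount (by norm_num)]
        unfold winAt
        simp
      rw [hs0w]
      set s0 := (winAt discount 0).foldl (bAdd t) (PySem.Dict.empty, 0, 0) with hs0
      have hinv0 : WInv t (winAt discount 0) s0 := winv_init t hnd hposv (winAt discount 0)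
      have hcond0 := cond_eq t hnd hposv (winAt discount 0) s0 hinv0
      -- the loop
      have hrange : PySem.List.pyRange 1 ((discount.length : Int) - 9) 1 =
          (List.range (discount.length - 10)).map (fun k : Nat => (1 : Int) + (k : Int)) := by
        rw [PySem.List.pyRange_one,
          show ((discount.length : Int) - 9 - 1).toNat = discount.length - 10 from by omega]
      rw [hrange]
      obtain ⟨_, hans⟩ := loopB_spec t discount hnd hposv (discount.length - 10) (by omega) s0
        (if s0.2.1 == (t.size : Int) && s0.2.2 == 0 then 1 else 0) hinv0
      rw [hans]
      rw [hA discount.length rfl]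
      have hNn : ((discount.length : Int) - 9).toNat = (discount.length - 10) + 1 := by omega
      rw [hNn, countP_range_succ_shift, ← hcond0]
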